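-- pv_equiv track=rewrite | github.com/rondweb/TinyTroupe | tinytroupe/profiling.py | _categorize_connectivity
-- ===== SOURCE A (Python) =====
-- from typing import Any, Callable, Dict, List, Optional, Union
--
-- def _categorize_connectivity(connections: List[int]) -> Dict[str, int]:
--     """Categorize agents by their connectivity level."""
--     categories = {"isolated": 0, "low": 0, "medium": 0, "high": 0}
--
--     for conn in connections:
--         if conn == 0:
--             categories["isolated"] += 1
--         elif conn <= 2:
--             categories["low"] += 1
--         elif conn <= 5:
--             categories["medium"] += 1
--         else:
--             categories["high"] += 1
--
--     return categories
-- ===== SOURCE B (Python) =====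
-- from typing import Dict, List
--
-- def _categorize_connectivity(connections: List[int]) -> Dict[str, int]:
--     """Categorize agents by their connectivity level (four independent passes)."""
--     isolated = sum(1 for c in connections if c == 0)
--     low = sum(1 for c in connections if c != 0 and c <= 2)
--     medium = sum(1 for c in connections if 2 < c <= 5)
--     high = sum(1 for c in connections if c > 5)
--     return {"isolated": isolated, "low": low, "medium": medium, "high": high}
-- ===== Notes on version B (the rewrite author's own statement) =====
-- stated objective: simpler
-- what changed: Replaces A's single-pass mutation of a four-counter dict via a branch chain with four independent sum-over-generator passes, one per bucket, and a literal dict of the results.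
import Mathlib
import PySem

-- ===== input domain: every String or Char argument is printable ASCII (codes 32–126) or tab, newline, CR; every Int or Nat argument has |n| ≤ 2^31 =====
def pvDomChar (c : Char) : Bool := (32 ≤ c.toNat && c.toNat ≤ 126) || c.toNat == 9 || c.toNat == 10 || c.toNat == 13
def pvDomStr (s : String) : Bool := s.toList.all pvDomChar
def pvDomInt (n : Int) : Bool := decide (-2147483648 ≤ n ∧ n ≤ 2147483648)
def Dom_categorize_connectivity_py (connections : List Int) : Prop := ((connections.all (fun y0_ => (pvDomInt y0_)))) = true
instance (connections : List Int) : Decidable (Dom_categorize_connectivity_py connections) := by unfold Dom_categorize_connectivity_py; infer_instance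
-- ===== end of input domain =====

-- B replaces A's single pass updating a four-key dict by four independent sum-over-generator passes, one per bucket (objective: simpler decomposition, same cost).

-- ===== PORT A =====
-- literal transliteration: a dict of four counters, one loop, branch chain in source order
def categorize_connectivity_py (connections : List Int) : List (String × Int) :=
  let categories : PySem.Dict String Int :=
    PySem.Dict.mk [("isolated", 0), ("low", 0), ("medium", 0), ("high", 0)]
  (connections.foldl (fun categories conn =>
      if conn = 0 then categories.modify "isolated" 0 (· + 1)
      else if conn ≤ 2 then categories.modify "low" 0 (· + 1)
      else if conn ≤ 5 then categories.modify "medium" 0 (· + 1)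
      else categories.modify "high" 0 (· + 1)) categories).items

-- ===== PORT B =====
-- four independent passes, each a sum of 0/1 over the list, then the literal dict
def categorize_connectivity_py_alt (connections : List Int) : List (String × Int) :=
  let isolated := (connections.map (fun c => if c = 0 then (1 : Int) else 0)).sum
  let low := (connections.map (fun c => if c ≠ 0 ∧ c ≤ 2 then (1 : Int) else 0)).sum
  let medium := (connections.map (fun c => if 2 < c ∧ c ≤ 5 then (1 : Int) else 0)).sum
  let high := (connections.map (fun c => if 5 < c then (1 : Int) else 0)).sum
  [("isolated", isolated), ("low", low), ("medium", medium), ("high", high)]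

-- ===== PRECONDITION & SPEC =====
def Spec_categorize_connectivity_py (connections : List Int) (out : List (String × Int)) : Prop := out = categorize_connectivity_py_alt connections
instance (connections : List Int) (out : List (String × Int)) : Decidable (Spec_categorize_connectivity_py connections out) := by unfold Spec_categorize_connectivity_py; infer_instance

-- ===== CLAIM (what is proved, stated in full; the proofs are below) =====
def Claim_equal_categorize_connectivity_py : Prop := ∀ (connections : List Int), Dom_categorize_connectivity_py connections → Spec_categorize_connectivity_py connections (categorize_connectivity_py connections)

-- ===== LEMMAS AND PROOFS =====

-- loop invariant for A's fold: the dict keeps its four entries, each accumulating its bucket's 0/1-sum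
lemma categorize_loop (l : List Int) (a b c d : Int) :
    (l.foldl (fun categories conn =>
        if conn = 0 then categories.modify "isolated" 0 (· + 1)
        else if conn ≤ 2 then categories.modify "low" 0 (· + 1)
        else if conn ≤ 5 then categories.modify "medium" 0 (· + 1)
        else categories.modify "high" 0 (· + 1))
      (PySem.Dict.mk [("isolated", a), ("low", b), ("medium", c), ("high", d)])) =
    PySem.Dict.mk
      [("isolated", a + (l.map (fun x => if x = 0 then (1 : Int) else 0)).sum),
       ("low", b + (l.map (fun x => if x ≠ 0 ∧ x ≤ 2 then (1 : Int) else 0)).sum),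
       ("medium", c + (l.map (fun x => if 2 < x ∧ x ≤ 5 then (1 : Int) else 0)).sum),
       ("high", d + (l.map (fun x => if 5 < x then (1 : Int) else 0)).sum)] := by
  induction l generalizing a b c d with
  | nil => simp
  | cons x xs ih =>
    simp only [List.foldl_cons, List.map_cons, List.sum_cons]
    by_cases h0 : x = 0
    · have : (PySem.Dict.mk [("isolated", a), ("low", b), ("medium", c), ("high", d)]).modify
          "isolated" 0 (· + 1) =
          PySem.Dict.mk [("isolated", a + 1), ("low", b), ("medium", c), ("high", d)] := by
        simp [PySem.Dict.modify, PySem.Dict.insert, PySem.Dict.getD, PySem.Dict.get?,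
          PySem.Dict.contains]
      rw [if_pos h0, this, ih]
      have hA : ¬ (x ≠ 0 ∧ x ≤ 2) := by omega
      have hB : ¬ (2 < x ∧ x ≤ 5) := by omega
      have hC : ¬ (5 < x) := by omega
      rw [if_pos h0, if_neg hA, if_neg hB, if_neg hC]
      simp [add_assoc]
    · by_cases hle2 : x ≤ 2
      · have : (PySem.Dict.mk [("isolated", a), ("low", b), ("medium", c), ("high", d)]).modify
            "low" 0 (· + 1) =
            PySem.Dict.mk [("isolated", a), ("low", b + 1), ("medium", c), ("high", d)] := by
          simp [PySem.Dict.modify, PySem.Dict.insert, PySem.Dict.getD, PySem.Dict.get?,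
            PySem.Dict.contains]
        rw [if_neg h0, if_pos hle2, this, ih]
        have hA : x ≠ 0 ∧ x ≤ 2 := ⟨h0, hle2⟩
        have hB : ¬ (2 < x ∧ x ≤ 5) := by omega
        have hC : ¬ (5 < x) := by omega
        rw [if_neg h0, if_pos hA, if_neg hB, if_neg hC]
        simp [add_assoc]
      · by_cases hle5 : x ≤ 5
        · have : (PySem.Dict.mk [("isolated", a), ("low", b), ("medium", c), ("high", d)]).modify
              "medium" 0 (· + 1) =
              PySem.Dict.mk [("isolated", a), ("low", b), ("medium", c + 1), ("high", d)] := by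
            simp [PySem.Dict.modify, PySem.Dict.insert, PySem.Dict.getD, PySem.Dict.get?,
              PySem.Dict.contains]
          rw [if_neg h0, if_neg hle2, if_pos hle5, this, ih]
          have hA : ¬ (x ≠ 0 ∧ x ≤ 2) := by omega
          have hB : 2 < x ∧ x ≤ 5 := by omega
          have hC : ¬ (5 < x) := by omega
          rw [if_neg h0, if_neg hA, if_pos hB, if_neg hC]
          simp [add_assoc]
        · have : (PySem.Dict.mk [("isolated", a), ("low", b), ("medium", c), ("high", d)]).modify
              "high" 0 (· + 1) =
              PySem.Dict.mk [("isolated", a), ("low", b), ("medium", c), ("high", d + 1)] := by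
            simp [PySem.Dict.modify, PySem.Dict.insert, PySem.Dict.getD, PySem.Dict.get?,
              PySem.Dict.contains]
          rw [if_neg h0, if_neg hle2, if_neg hle5, this, ih]
          have hA : ¬ (x ≠ 0 ∧ x ≤ 2) := by omega
          have hB : ¬ (2 < x ∧ x ≤ 5) := by omega
          have hC : 5 < x := by omega
          rw [if_neg h0, if_neg hA, if_neg hB, if_pos hC]
          simp [add_assoc]

-- ===== VERDICT (by name: the statement is the Claim_ definition above) =====
theorem categorize_connectivity_py_spec : Claim_equal_categorize_connectivity_py := by
  intro connections _
  unfold Spec_categorize_connectivity_py categorize_connectivity_py categorize_connectivity_py_alt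
  simp only [categorize_loop]
  simp
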